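-- pv_equiv track=rewrite | github.com/anishupr47-git/Technical-Assessment-Python-Backend-AI-R-D-Engineer | app/services.py | read_ai_text
-- ===== SOURCE A (Python) =====
-- VALID_CATEGORIES = {"billing", "account", "technical", "feature_request", "general"}
--
-- VALID_PRIORITIES = {"low", "medium", "high"}
--
-- def empty_ai_result() -> dict:
--     return {"summary": None, "category": None, "priority": None}
--
-- def read_ai_text(ai_text: str) -> dict:
--     """Read lines in format: summary/category/priority."""
--     ai_result = empty_ai_result()
--
--     for line in ai_text.splitlines():
--         if ":" not in line:
--             continue
--
--         key, value = line.split(":", 1)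
--         key = key.strip().lower()
--         value = value.strip()
--
--         if not value:
--             continue
--
--         if key == "summary":
--             ai_result["summary"] = value
--         elif key == "category":
--             ai_result["category"] = value.lower()
--         elif key == "priority":
--             ai_result["priority"] = value.lower()
--
--     if ai_result["category"] not in VALID_CATEGORIES:
--         ai_result["category"] = None
--     if ai_result["priority"] not in VALID_PRIORITIES:
--         ai_result["priority"] = None
--
--     return ai_result
-- ===== SOURCE B (Python) =====
-- VALID_CATEGORIES = {"billing", "account", "technical", "feature_request", "general"}
--
-- VALID_PRIORITIES = {"low", "medium", "high"}
--
-- def _last_field(rlines, field):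
--     """First nonempty match over the reversed lines = last-wins in original order."""
--     for line in rlines:
--         if ":" not in line:
--             continue
--         key, value = line.split(":", 1)
--         if key.strip().lower() != field:
--             continue
--         value = value.strip()
--         if value:
--             return value
--     return None
--
-- def read_ai_text(ai_text: str) -> dict:
--     """Per-field backward search: the last valid occurrence of each key wins."""
--     rlines = ai_text.splitlines()[::-1]
--     summary = _last_field(rlines, "summary")
--     category = _last_field(rlines, "category")
--     if category is not None:
--         category = category.lower()
--         if category not in VALID_CATEGORIES:
--             category = None
--     priority = _last_field(rlines, "priority")
--     if priority is not None:
--         priority = priority.lower()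
--         if priority not in VALID_PRIORITIES:
--             priority = None
--     return {"summary": summary, "category": category, "priority": priority}
-- ===== Notes on version B (the rewrite author's own statement) =====
-- stated objective: alternative
-- what changed: B keeps no accumulator at all: instead of A's single forward pass mutating a result dict with last-wins overwrites, B reverses the line list once and runs an independent first-match backward search per field (summary/category/priority), then validates; correct because the first nonempty match in reverse order is exactly the last-wins value.
import Mathlib
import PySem

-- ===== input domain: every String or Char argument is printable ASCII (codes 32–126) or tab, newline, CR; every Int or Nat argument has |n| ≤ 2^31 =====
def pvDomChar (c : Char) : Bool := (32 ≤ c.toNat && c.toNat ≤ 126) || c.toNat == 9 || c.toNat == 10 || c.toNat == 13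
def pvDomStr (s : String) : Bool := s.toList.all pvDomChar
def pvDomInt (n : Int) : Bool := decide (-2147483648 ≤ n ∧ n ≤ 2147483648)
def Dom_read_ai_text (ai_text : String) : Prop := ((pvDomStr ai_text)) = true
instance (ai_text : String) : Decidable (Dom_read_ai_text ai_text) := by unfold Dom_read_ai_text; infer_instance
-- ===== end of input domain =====

-- B drops A's mutable accumulator: it reverses the line list once and runs an independent
-- first-match backward search per field, then validates (objective: alternative algorithm).

-- ===== PORT A =====
def pvValidCategories : List String := ["billing", "account", "technical", "feature_request", "general"]

def pvValidPriorities : List String := ["low", "medium", "high"]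

def empty_ai_result : PySem.Dict String (Option String) :=
  PySem.Dict.mk [("summary", none), ("category", none), ("priority", none)]

-- loop body of A: one line updating ai_result
def pvStepA (d : PySem.Dict String (Option String)) (line : String) :
    PySem.Dict String (Option String) :=
  if PySem.Str.isIn ":" line = false then d
  else
    match PySem.Str.splitMax? line ":" 1 with
    | some [k, v] =>
      let key := PySem.Str.lower (PySem.Str.strip k)
      let value := PySem.Str.strip v
      if value = "" then d
      else if key = "summary" then d.insert "summary" (some value)
      else if key = "category" then d.insert "category" (some (PySem.Str.lower value))
      else if key = "priority" then d.insert "priority" (some (PySem.Str.lower value))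
      else d
    | _ => d  -- unreachable: split(":",1) with ":" ∈ line yields exactly two parts

def read_ai_text (ai_text : String) : List (String × Option String) :=
  let ai_result := (PySem.Str.splitlines ai_text).foldl pvStepA empty_ai_result
  let ai_result :=
    if (match ai_result.getD "category" none with
        | some s => decide (s ∈ pvValidCategories)
        | none => false) = false
    then ai_result.insert "category" none else ai_result
  let ai_result :=
    if (match ai_result.getD "priority" none with
        | some s => decide (s ∈ pvValidPriorities)
        | none => false) = false
    then ai_result.insert "priority" none else ai_result
  ai_result.items

-- ===== PORT B =====
-- body of _last_field's loop for one line: some v ⇔ the line sets `field` to nonempty v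
def pvHitB (line field : String) : Option String :=
  if PySem.Str.isIn ":" line = false then none
  else
    match PySem.Str.splitMax? line ":" 1 with
    | some [k, v] =>
      if PySem.Str.lower (PySem.Str.strip k) ≠ field then none
      else
        let value := PySem.Str.strip v
        if value = "" then none else some value
    | _ => none  -- unreachable, as in pvStepA

-- _last_field: the for-loop with early return, as structural recursion
def pvLastField : List String → String → Option String
  | [], _ => none
  | l :: ls, f =>
    match pvHitB l f with
    | some v => some v
    | none => pvLastField ls f

def read_ai_text_alt (ai_text : String) : List (String × Option String) :=
  -- xs[::-1] is List.reverse (PySem.List.slice?_none_none_neg_one)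
  let rlines := (PySem.Str.splitlines ai_text).reverse
  let summary := pvLastField rlines "summary"
  let category :=
    match pvLastField rlines "category" with
    | some c =>
      let c := PySem.Str.lower c
      if decide (c ∈ pvValidCategories) = false then none else some c
    | none => none
  let priority :=
    match pvLastField rlines "priority" with
    | some p =>
      let p := PySem.Str.lower p
      if decide (p ∈ pvValidPriorities) = false then none else some p
    | none => none
  [("summary", summary), ("category", category), ("priority", priority)]

-- ===== PRECONDITION & SPEC =====
def Spec_read_ai_text (ai_text : String) (out : List (String × Option String)) : Prop := out = read_ai_text_alt ai_text
instance (ai_text : String) (out : List (String × Option String)) : Decidable (Spec_read_ai_text ai_text out) := by unfold Spec_read_ai_text; infer_instance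

-- ===== CLAIM (what is proved, stated in full; the proofs are below) =====
def Claim_equal_read_ai_text : Prop := ∀ (ai_text : String), Dom_read_ai_text ai_text → Spec_read_ai_text ai_text (read_ai_text ai_text)

-- ===== LEMMAS AND PROOFS =====

-- merge a backward-search result over a base value, storing via tf
def pvUpd (tf : String → Option String) (base : Option String) (h : Option String) : Option String :=
  match h with | some v => tf v | none => base

-- A's single step, expressed through pvHitB
theorem pvStepA_eq (s c p : Option String) (l : String) :
    pvStepA (PySem.Dict.mk [("summary", s), ("category", c), ("priority", p)]) l
      = PySem.Dict.mk
          [("summary", pvUpd some s (pvHitB l "summary")),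
           ("category", pvUpd (fun v => some (PySem.Str.lower v)) c (pvHitB l "category")),
           ("priority", pvUpd (fun v => some (PySem.Str.lower v)) p (pvHitB l "priority"))] := by
  unfold pvStepA pvHitB
  by_cases hin : PySem.Chars.isIn [':'] l.toList = false
  · simp [hin, pvUpd]
  · cases hsp : PySem.Str.splitMax? l ":" 1 with
    | none => simp [hin, pvUpd]
    | some parts =>
      rcases parts with _ | ⟨k, _ | ⟨v, _ | ⟨w, rest⟩⟩⟩
      · simp [hin, pvUpd]
      · simp [hin, pvUpd]
      · by_cases hv : PySem.Str.strip v = ""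
        · simp [hin, hv, pvUpd]
        · by_cases hk1 : PySem.Str.lower (PySem.Str.strip k) = "summary"
          · apply PySem.Dict.ext
            simp [hin, hv, hk1, pvUpd, PySem.Dict.items_insert, PySem.Dict.contains_mk]
          · by_cases hk2 : PySem.Str.lower (PySem.Str.strip k) = "category"
            · apply PySem.Dict.ext
              simp [hin, hv, hk2, pvUpd, PySem.Dict.items_insert, PySem.Dict.contains_mk]
            · by_cases hk3 : PySem.Str.lower (PySem.Str.strip k) = "priority"
              · apply PySem.Dict.ext
                simp [hin, hv, hk3, pvUpd, PySem.Dict.items_insert, PySem.Dict.contains_mk]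
              · simp [hin, hv, hk1, hk2, hk3, pvUpd]
      · simp [hin, pvUpd]

-- first match over xs ++ ys
theorem pvLastField_append (xs ys : List String) (f : String) :
    pvLastField (xs ++ ys) f
      = match pvLastField xs f with
        | some v => some v
        | none => pvLastField ys f := by
  induction xs with
  | nil => simp [pvLastField]
  | cons l ls ih =>
    simp only [List.cons_append, pvLastField]
    cases pvHitB l f <;> simp [ih]

-- A's whole fold, characterized by B's backward searches
theorem pvFoldA_eq (lines : List String) (s c p : Option String) :
    lines.foldl pvStepA (PySem.Dict.mk [("summary", s), ("category", c), ("priority", p)])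
      = PySem.Dict.mk
          [("summary", pvUpd some s (pvLastField lines.reverse "summary")),
           ("category", pvUpd (fun v => some (PySem.Str.lower v)) c (pvLastField lines.reverse "category")),
           ("priority", pvUpd (fun v => some (PySem.Str.lower v)) p (pvLastField lines.reverse "priority"))] := by
  induction lines generalizing s c p with
  | nil => simp [pvLastField, pvUpd]
  | cons l ls ih =>
    rw [List.foldl_cons, pvStepA_eq, ih]
    have hrev : (l :: ls).reverse = ls.reverse ++ [l] := by simp
    rw [hrev]
    congr 1
    rw [pvLastField_append, pvLastField_append, pvLastField_append]
    cases h1 : pvLastField ls.reverse "summary" <;>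
      cases h2 : pvLastField ls.reverse "category" <;>
        cases h3 : pvLastField ls.reverse "priority" <;>
          cases h1' : pvHitB l "summary" <;>
            cases h2' : pvHitB l "category" <;>
              cases h3' : pvHitB l "priority" <;>
                simp [pvUpd, pvLastField, h1', h2', h3']

-- ===== VERDICT (by name: the statement is the Claim_ definition above) =====
theorem read_ai_text_spec : Claim_equal_read_ai_text := by
  intro s _
  unfold Spec_read_ai_text read_ai_text read_ai_text_alt
  have hA := pvFoldA_eq (PySem.Str.splitlines s) none none none
  rw [show empty_ai_result = PySem.Dict.mk
    [("summary", (none : Option String)), ("category", none), ("priority", none)] from rfl, hA]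
  cases hs : pvLastField (PySem.Str.splitlines s).reverse "summary" <;>
  cases hc : pvLastField (PySem.Str.splitlines s).reverse "category" with
  | none =>
    cases hp : pvLastField (PySem.Str.splitlines s).reverse "priority" with
    | none =>
      simp [pvUpd, hs, hc, hp, PySem.Dict.getD_eq_get?_getD, PySem.Dict.get?_mk_cons,
        PySem.Dict.items_insert, PySem.Dict.get?_insert, PySem.Dict.contains_insert,
        PySem.Dict.contains_mk]
    | some p =>
      by_cases h2 : PySem.Str.lower p ∈ pvValidPriorities <;>
        simp [pvUpd, hs, hc, hp, h2, PySem.Dict.getD_eq_get?_getD, PySem.Dict.get?_mk_cons,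
          PySem.Dict.items_insert, PySem.Dict.get?_insert, PySem.Dict.contains_insert,
          PySem.Dict.contains_mk]
  | some c =>
    cases hp : pvLastField (PySem.Str.splitlines s).reverse "priority" with
    | none =>
      by_cases h1 : PySem.Str.lower c ∈ pvValidCategories <;>
        simp [pvUpd, hs, hc, hp, h1, PySem.Dict.getD_eq_get?_getD, PySem.Dict.get?_mk_cons,
          PySem.Dict.items_insert, PySem.Dict.get?_insert, PySem.Dict.contains_insert,
          PySem.Dict.contains_mk]
    | some p =>
      by_cases h1 : PySem.Str.lower c ∈ pvValidCategories <;>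
        by_cases h2 : PySem.Str.lower p ∈ pvValidPriorities <;>
          simp [pvUpd, hs, hc, hp, h1, h2, PySem.Dict.getD_eq_get?_getD, PySem.Dict.get?_mk_cons,
            PySem.Dict.items_insert, PySem.Dict.get?_insert, PySem.Dict.contains_insert,
            PySem.Dict.contains_mk]
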